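-- pv_equiv track=rewrite | github.com/1000timesdead/portage-funtoo | pym/portage/package/ebuild/_config/KeywordsManager.py | _getEgroups
-- ===== SOURCE A (Python) =====
-- def _getEgroups(egroups, mygroups):
-- 	"""gets any keywords defined in the environment
--
-- 	@param backuped_accept_keywords: ACCEPT_KEYWORDS from the backup env
-- 	@type backuped_accept_keywords: String
-- 	@rtype: List
-- 	@return: list of KEYWORDS that have been accepted
-- 	"""
-- 	mygroups = list(mygroups)
-- 	mygroups.extend(egroups)
-- 	inc_pgroups = set()
-- 	for x in mygroups:
-- 		if x[:1] == "-":
-- 			if x == "-*":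
-- 				inc_pgroups.clear()
-- 			else:
-- 				inc_pgroups.discard(x[1:])
-- 		else:
-- 			inc_pgroups.add(x)
-- 	return inc_pgroups
-- ===== SOURCE B (Python) =====
-- def _getEgroups(egroups, mygroups):
--     tokens = list(mygroups) + list(egroups)
--     killed = set()
--     survivors = []
--     for x in reversed(tokens):
--         if x == "-*":
--             break
--         if x.startswith("-"):
--             killed.add(x[1:])
--         elif x not in killed:
--             survivors.append(x)
--     return set(reversed(survivors))
-- ===== Notes on version B (the rewrite author's own statement) =====
-- stated objective: alternative
-- what changed: Replaces the forward fold over a mutated set (add/discard/clear) by a single reverse scan that stops at the last '-*' and resolves each keyword by its last action via a 'killed' gate, collecting survivors and building the set at the end.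
import Mathlib
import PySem

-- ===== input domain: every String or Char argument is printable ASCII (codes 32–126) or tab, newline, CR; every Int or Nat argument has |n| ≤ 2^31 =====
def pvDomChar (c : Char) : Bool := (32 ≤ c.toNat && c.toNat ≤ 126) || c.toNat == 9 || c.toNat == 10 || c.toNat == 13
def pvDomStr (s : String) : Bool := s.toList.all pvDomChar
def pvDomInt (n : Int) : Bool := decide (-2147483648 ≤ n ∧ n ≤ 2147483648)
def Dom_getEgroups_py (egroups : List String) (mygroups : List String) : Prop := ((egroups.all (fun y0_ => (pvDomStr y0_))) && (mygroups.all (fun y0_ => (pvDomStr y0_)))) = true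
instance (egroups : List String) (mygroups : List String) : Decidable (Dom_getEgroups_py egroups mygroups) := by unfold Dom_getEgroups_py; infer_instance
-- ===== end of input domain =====

-- B replaces A's forward fold over a mutated set by a reverse scan with a 'killed' gate that stops
-- at the last "-*" (alternative decomposition; same return value, A does not mutate its arguments).

-- ===== PORT A =====
-- one loop step of A's 'for x in mygroups' body (A's branches, in A's order)
def pvStepA (inc_pgroups : PySem.Set String) (x : String) : PySem.Set String :=
  if PySem.Str.slice x none (some 1) = "-" then
    if x = "-*" then PySem.Set.empty
    else PySem.Set.discard inc_pgroups (PySem.Str.slice x (some 1) none)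
  else PySem.Set.add inc_pgroups x

def getEgroups_py (egroups : List String) (mygroups : List String) : List String :=
  let mygroups1 := mygroups ++ egroups     -- mygroups = list(mygroups); mygroups.extend(egroups)
  mygroups1.foldl pvStepA PySem.Set.empty

-- ===== PORT B =====
-- the 'for x in reversed(tokens)' loop of Source B: returns the survivors list in scan order
def pvRScan : List String → PySem.Set String → List String
  | [], _ => []
  | x :: rest, killed =>
    if x = "-*" then []                                   -- break
    else if PySem.Str.startswith x "-" then
      pvRScan rest (PySem.Set.add killed (PySem.Str.slice x (some 1) none))
    else if PySem.Set.contains killed x then pvRScan rest killed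
    else x :: pvRScan rest killed                          -- survivors.append(x)

def getEgroups_py_alt (egroups : List String) (mygroups : List String) : List String :=
  let tokens := mygroups ++ egroups
  PySem.Set.ofList (pvRScan tokens.reverse PySem.Set.empty).reverse

-- ===== PRECONDITION & SPEC =====
def Spec_getEgroups_py (egroups : List String) (mygroups : List String) (out : List String) : Prop := out = getEgroups_py_alt egroups mygroups
instance (egroups : List String) (mygroups : List String) (out : List String) : Decidable (Spec_getEgroups_py egroups mygroups out) := by unfold Spec_getEgroups_py; infer_instance

-- ===== CLAIM (what is proved, stated in full; the proofs are below) =====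
def Claim_equal_getEgroups_py : Prop := ∀ (egroups : List String) (mygroups : List String), Dom_getEgroups_py egroups mygroups → Spec_getEgroups_py egroups mygroups (getEgroups_py egroups mygroups)

-- ===== LEMMAS AND PROOFS =====

-- A's branch test x[:1] == "-" coincides with B's x.startswith("-")
lemma pvCond_eq (x : String) : (PySem.Str.slice x none (some 1) = "-") ↔ PySem.Str.startswith x "-" = true := by
  rw [String.ext_iff, PySem.Str.toList_slice]
  simp only [PySem.Str.startswith_eq, PySem.Chars.startswith_iff, PySem.Chars.slice_eq_listSlice]
  have h1 : PySem.List.slice x.toList none (some ((1:Nat):Int)) = x.toList.take 1 :=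
    PySem.List.slice_to_natCast x.toList 1
  norm_num at h1
  rw [h1]
  have hd : "-".toList = ['-'] := by decide
  rw [hd]
  cases x.toList with
  | nil => simp
  | cons c t => simp [List.cons_prefix_cons, eq_comm]
-- contains of add, as a Bool equation
lemma pvContains_add (s : List String) (a y : String) :
    PySem.Set.contains (PySem.Set.add s a) y = (PySem.Set.contains s y || (y == a)) := by
  simp only [PySem.Set.add]
  by_cases h : List.contains s a <;> by_cases hy : y = a <;> simp_all

-- main invariant: the reverse scan from a 'killed' set computes A's set filtered by 'killed'
lemma pvScan_filter : ∀ (r : List String) (killed : List String),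
    PySem.Set.ofList (pvRScan r killed).reverse
      = (r.reverse.foldl pvStepA PySem.Set.empty).filter (fun y => !(PySem.Set.contains killed y)) := by
  intro r
  induction r with
  | nil => intro killed; simp [pvRScan, PySem.Set.ofList, PySem.Set.empty]
  | cons x r' ih =>
    intro killed
    have hrev : (x :: r').reverse = r'.reverse ++ [x] := by simp
    rw [hrev, List.foldl_append]
    simp only [List.foldl_cons, List.foldl_nil]
    by_cases hstar : x = "-*"
    · subst hstar
      have hsl : PySem.Str.slice "-*" none (some 1) = "-" := by decide
      have hstep : pvStepA (r'.reverse.foldl pvStepA PySem.Set.empty) "-*" = PySem.Set.empty := by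
        unfold pvStepA; rw [if_pos hsl, if_pos rfl]
      rw [hstep, pvRScan, if_pos rfl]
      simp [PySem.Set.ofList, PySem.Set.empty]
    · by_cases hdash : PySem.Str.startswith x "-" = true
      · rw [pvRScan]
        simp only [if_neg hstar, if_pos hdash]
        rw [ih]
        unfold pvStepA
        rw [if_pos ((pvCond_eq x).mpr hdash), if_neg hstar]
        rw [PySem.Set.discard, List.filter_filter]
        apply List.filter_congr
        intro y _
        rw [pvContains_add]
        cases PySem.Set.contains killed y <;> cases y == PySem.Str.slice x (some 1) none <;> rfl
      · rw [pvRScan]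
        simp only [if_neg hstar, if_neg hdash]
        have hstep : pvStepA (r'.reverse.foldl pvStepA PySem.Set.empty) x
            = PySem.Set.add (r'.reverse.foldl pvStepA PySem.Set.empty) x := by
          unfold pvStepA
          rw [if_neg (fun h => hdash ((pvCond_eq x).mp h))]
        rw [hstep]
        by_cases hk : PySem.Set.contains killed x = true
        · rw [if_pos hk, ih]
          have hk' : x ∈ killed := by simpa using hk
          rw [PySem.Set.add_eq_ite]
          by_cases hx : x ∈ r'.reverse.foldl pvStepA PySem.Set.empty
          · rw [if_pos hx]
          · rw [if_neg hx, List.filter_append]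
            simp [hk']
        · rw [if_neg hk]
          have hk' : x ∉ killed := by simpa using hk
          have hmemf : ∀ (l : List String), x ∈ l.filter (fun y => !PySem.Set.contains killed y) ↔ x ∈ l := by
            intro l; simp [List.mem_filter, hk']
          have hcons : (x :: pvRScan r' killed).reverse = (pvRScan r' killed).reverse ++ [x] := by simp
          rw [hcons, PySem.Set.ofList_append_singleton, ih]
          rw [PySem.Set.add_eq_ite, PySem.Set.add_eq_ite]
          by_cases hx : x ∈ r'.reverse.foldl pvStepA PySem.Set.empty
          · rw [if_pos hx, if_pos ((hmemf _).mpr hx)]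
          · rw [if_neg hx, if_neg (fun h => hx ((hmemf _).mp h)), List.filter_append]
            simp [hk']

-- ===== VERDICT (by name: the statement is the Claim_ definition above) =====
theorem getEgroups_py_spec : Claim_equal_getEgroups_py := by
  intro egroups mygroups _
  unfold Spec_getEgroups_py getEgroups_py getEgroups_py_alt
  rw [pvScan_filter, List.reverse_reverse]
  simp [PySem.Set.contains, PySem.Set.empty]
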